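-- pv_equiv track=rewrite | github.com/osalas29/spiner-pro-app | main.py | patron_inicial_12
-- ===== SOURCE A (Python) =====
-- from typing import List, Set, Tuple, Optional, Dict
--
-- COMBINACIONES_COLOR_PREDICCION = [
--     {"patrones": ["NNNNNNN"], "resultado_color": 'N'},
--     {"patrones": ["RNNNNNN", "NRNNNNN", "NNRNNNN", "NNNRNNN", "NNNNRNN", "NNNNNRN", "NNNNNNR"], "resultado_color": 'R'},
--     {"patrones": ["RRNNNNN", "RNRNNNN", "RNNRNNN", "RNNNRNN", "RNNNNRN", "RNNNNNR", "NRRNNNN", "NRNRNNN", "NRNNRNN", "NRNNNRN", "NRNNNNR", "NNRRNNN", "NNRNRNN", "NNRNNRN", "NNRNNNR", "NNNRRNN", "NNNRNRN", "NNNRNNR", "NNNNRRN", "NNNNRNR", "NNNNNRR"], "resultado_color": 'N'},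
--     {"patrones": ["RRRNNNN", "RRNRNNN", "RRNNRNN", "RRNNNRN", "RRNNNNR", "RNRRNNN", "RNRNRNN", "RNRNNRN", "RNRNNNR", "RNNRRNN", "RNNRNRN", "RNNRNNR", "RNNNRRN", "RNNNRNR", "RNNNNRR", "NRRRNNN", "NRRNRNN", "NRRNNRN", "NRRNNNR", "NRNRRNN", "NRNRNRN", "NRNRNNR", "NRNNRRN", "NRNNRNR", "NRNNNRR", "NNRRRNN", "NNRRNRN", "NNRRNNR", "NNRNRRN", "NNRNRNR", "NNRNNRR", "NNNRRRN", "NNNRRNR", "NNNRNRR", "NNNNRRR"], "resultado_color": 'R'},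
--     {"patrones": ["RRRRNNN", "RRRNRNN", "RRRNNRN", "RRRNNNR", "RRNRRNN", "RRNRNRN", "RRNRNNR", "RRNNRRN", "RRNNRNR", "RRNNNRR", "RNRRRNN", "RNRRNRN", "RNRRNNR", "RNRNRRN", "RNRNRNR", "RNRNNRR", "RNNRRRN", "RNNRRNR", "RNNRNRR", "RNNNRRR", "NRRRRNN", "NRRRNRN", "NRRRNNR", "NRRNRRN", "NRRNRNR", "NRRNNRR", "NRNRRRN", "NRNRRNR", "NRNRNRR", "NRNNRRR", "NNRRRRN", "NNRRRNR", "NNRRNRR", "NNRNRRR", "NNNRRRR"], "resultado_color": 'N'},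
--     {"patrones": ["RRRRRNN", "RRRRNRN", "RRRRNNR", "RRRNRRN", "RRRNRNR", "RRRNNRR", "RRNRRRN", "RRNRRNR", "RRNRNRR", "RRNNRRR", "RNRRRRN", "RNRRRNR", "RNRRNRR", "RNRNRRR", "RNNRRRR", "NRRRRRN", "NRRRRNR", "NRRRNRR", "NRRNRRR", "NRNRRRR", "NNRRRRR"], "resultado_color": 'R'},
--     {"patrones": ["RRRRRRN", "RRRRRNR", "RRRRNRR", "RRRNRRR", "RRNRRRR", "RNRRRRR", "NRRRRRR"], "resultado_color": 'N'},
--     {"patrones": ["RRRRRRR"], "resultado_color": 'R'}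
-- ]
--
-- LONGITUD_BLOQUE = 7
--
-- def patron_inicial_12(tokens_bloque: List[str]) -> Tuple[Optional[str], Optional[str]]:
--     N = LONGITUD_BLOQUE
--     if len(tokens_bloque) < N: return None, None
--     patron_string = "".join(tokens_bloque[-N:])
--     for entry in COMBINACIONES_COLOR_PREDICCION:
--         if patron_string in entry["patrones"]:
--             return entry["resultado_color"], patron_string
--     return None, None
-- ===== SOURCE B (Python) =====
-- from typing import List, Tuple, Optional
--
-- LONGITUD_BLOQUE = 7
--
-- def patron_inicial_12(tokens_bloque: List[str]) -> Tuple[Optional[str], Optional[str]]: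
--     N = LONGITUD_BLOQUE
--     if len(tokens_bloque) < N:
--         return None, None
--     patron_string = "".join(tokens_bloque[-N:])
--     if len(patron_string) == N and all(c in "RN" for c in patron_string):
--         return ('R' if patron_string.count('R') % 2 == 1 else 'N'), patron_string
--     return None, None
-- ===== Notes on version B (the rewrite author's own statement) =====
-- stated objective: simpler
-- what changed: The 128-entry fixed pattern table and its linear scan are replaced by a closed-form parity rule: a joined string is classified iff it is exactly 7 characters of 'R'/'N', and the color is 'R' iff the count of 'R' is odd.
import Mathlib
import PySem

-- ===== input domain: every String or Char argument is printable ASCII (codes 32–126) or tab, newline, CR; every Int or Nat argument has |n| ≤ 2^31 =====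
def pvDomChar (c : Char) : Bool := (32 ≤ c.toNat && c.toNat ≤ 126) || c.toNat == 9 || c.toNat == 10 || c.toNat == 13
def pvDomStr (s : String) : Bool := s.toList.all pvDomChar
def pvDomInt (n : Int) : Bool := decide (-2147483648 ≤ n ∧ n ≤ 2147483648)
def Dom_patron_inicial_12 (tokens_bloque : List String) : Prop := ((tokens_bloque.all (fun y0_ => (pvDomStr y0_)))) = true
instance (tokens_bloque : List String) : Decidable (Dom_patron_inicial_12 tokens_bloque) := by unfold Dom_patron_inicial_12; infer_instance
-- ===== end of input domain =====

-- B replaces A's fixed 128-pattern table scan by a closed-form parity rule (valid 7-char R/N string → 'R' iff odd count of 'R'); objective: simpler.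

-- ===== PORT A =====
-- COMBINACIONES_COLOR_PREDICCION: list of ("patrones", "resultado_color") entries
def pvCombinaciones : List (List String × String) := [
  (["NNNNNNN"], "N"),
  (["RNNNNNN", "NRNNNNN", "NNRNNNN", "NNNRNNN", "NNNNRNN", "NNNNNRN", "NNNNNNR"], "R"),
  (["RRNNNNN", "RNRNNNN", "RNNRNNN", "RNNNRNN", "RNNNNRN", "RNNNNNR", "NRRNNNN", "NRNRNNN", "NRNNRNN", "NRNNNRN", "NRNNNNR", "NNRRNNN", "NNRNRNN", "NNRNNRN", "NNRNNNR", "NNNRRNN", "NNNRNRN", "NNNRNNR", "NNNNRRN", "NNNNRNR", "NNNNNRR"], "N"),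
  (["RRRNNNN", "RRNRNNN", "RRNNRNN", "RRNNNRN", "RRNNNNR", "RNRRNNN", "RNRNRNN", "RNRNNRN", "RNRNNNR", "RNNRRNN", "RNNRNRN", "RNNRNNR", "RNNNRRN", "RNNNRNR", "RNNNNRR", "NRRRNNN", "NRRNRNN", "NRRNNRN", "NRRNNNR", "NRNRRNN", "NRNRNRN", "NRNRNNR", "NRNNRRN", "NRNNRNR", "NRNNNRR", "NNRRRNN", "NNRRNRN", "NNRRNNR", "NNRNRRN", "NNRNRNR", "NNRNNRR", "NNNRRRN", "NNNRRNR", "NNNRNRR", "NNNNRRR"], "R"),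
  (["RRRRNNN", "RRRNRNN", "RRRNNRN", "RRRNNNR", "RRNRRNN", "RRNRNRN", "RRNRNNR", "RRNNRRN", "RRNNRNR", "RRNNNRR", "RNRRRNN", "RNRRNRN", "RNRRNNR", "RNRNRRN", "RNRNRNR", "RNRNNRR", "RNNRRRN", "RNNRRNR", "RNNRNRR", "RNNNRRR", "NRRRRNN", "NRRRNRN", "NRRRNNR", "NRRNRRN", "NRRNRNR", "NRRNNRR", "NRNRRRN", "NRNRRNR", "NRNRNRR", "NRNNRRR", "NNRRRRN", "NNRRRNR", "NNRRNRR", "NNRNRRR", "NNNRRRR"], "N"),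
  (["RRRRRNN", "RRRRNRN", "RRRRNNR", "RRRNRRN", "RRRNRNR", "RRRNNRR", "RRNRRRN", "RRNRRNR", "RRNRNRR", "RRNNRRR", "RNRRRRN", "RNRRRNR", "RNRRNRR", "RNRNRRR", "RNNRRRR", "NRRRRRN", "NRRRRNR", "NRRRNRR", "NRRNRRR", "NRNRRRR", "NNRRRRR"], "R"),
  (["RRRRRRN", "RRRRRNR", "RRRRNRR", "RRRNRRR", "RRNRRRR", "RNRRRRR", "NRRRRRR"], "N"),
  (["RRRRRRR"], "R")]

-- the 'for entry in COMBINACIONES_COLOR_PREDICCION' loop with early return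
def pvScanTable (patron_string : String) : List (List String × String) → Option String × Option String
  | [] => (none, none)
  | entry :: rest =>
      if patron_string ∈ entry.1 then (some entry.2, some patron_string)
      else pvScanTable patron_string rest

def patron_inicial_12 (tokens_bloque : List String) : Option String × Option String :=
  if (tokens_bloque.length : Int) < 7 then (none, none)
  else
    let patron_string := PySem.Str.join "" (PySem.List.slice tokens_bloque (some (-7)) none)
    pvScanTable patron_string pvCombinaciones

-- ===== PORT B =====
def patron_inicial_12_alt (tokens_bloque : List String) : Option String × Option String :=
  if (tokens_bloque.length : Int) < 7 then (none, none)
  else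
    let patron_string := PySem.Str.join "" (PySem.List.slice tokens_bloque (some (-7)) none)
    if PySem.Str.len patron_string == 7 &&
       patron_string.toList.all (fun c => PySem.Chars.isIn [c] "RN".toList) then
      ((if PySem.Str.count patron_string "R" % 2 == 1 then some "R" else some "N"), some patron_string)
    else (none, none)

-- ===== PRECONDITION & SPEC =====
def Spec_patron_inicial_12 (tokens_bloque : List String) (out : Option String × Option String) : Prop := out = patron_inicial_12_alt tokens_bloque
instance (tokens_bloque : List String) (out : Option String × Option String) : Decidable (Spec_patron_inicial_12 tokens_bloque out) := by unfold Spec_patron_inicial_12; infer_instance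

-- ===== CLAIM (what is proved, stated in full; the proofs are below) =====
def Claim_equal_patron_inicial_12 : Prop := ∀ (tokens_bloque : List String), Dom_patron_inicial_12 tokens_bloque → Spec_patron_inicial_12 tokens_bloque (patron_inicial_12 tokens_bloque)

-- ===== LEMMAS AND PROOFS =====

-- every pattern string in the table is a length-7 string over {'R','N'}
set_option maxRecDepth 8192 in
lemma pv_table_valid : ∀ e ∈ pvCombinaciones, ∀ p ∈ e.1,
    p.toList.length = 7 ∧ p.toList.all (fun c => c == 'R' || c == 'N') = true := by
  intro e he
  simp only [pvCombinaciones, List.mem_cons, List.not_mem_nil, or_false] at he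
  rcases he with rfl | rfl | rfl | rfl | rfl | rfl | rfl | rfl <;> decide

-- if the string is in no entry's pattern list, the scan returns (none, none)
lemma pv_scan_none (s : String) (t : List (List String × String))
    (h : ∀ e ∈ t, s ∉ e.1) : pvScanTable s t = (none, none) := by
  induction t with
  | nil => rfl
  | cons e rest ih =>
      simp only [pvScanTable]
      rw [if_neg (h e (List.mem_cons_self))]
      exact ih (fun e' he' => h e' (List.mem_cons_of_mem _ he'))

-- the table scan agrees with the closed-form parity rule, stated over the char list
lemma pv_key (l : List Char) :
    pvScanTable (String.ofList l) pvCombinaciones =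
    (if (decide (l.length = 7) && l.all (fun c => PySem.Chars.isIn [c] ['R','N'])) then
       ((if PySem.Chars.count l ['R'] % 2 == 1 then some "R" else some "N"),
        some (String.ofList l))
     else (none, none)) := by
  by_cases hv : l.length = 7 ∧ ∀ c ∈ l, c = 'R' ∨ c = 'N'
  · obtain ⟨hlen, hall⟩ := hv
    rcases l with _ | ⟨a, _ | ⟨b, _ | ⟨c, _ | ⟨d, _ | ⟨e, _ | ⟨f, _ | ⟨g, _ | ⟨h8, t⟩⟩⟩⟩⟩⟩⟩⟩ <;>
      simp only [List.length] at hlen <;> try omega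
    have ha := hall a (by simp); have hb := hall b (by simp)
    have hc := hall c (by simp); have hd := hall d (by simp)
    have he := hall e (by simp); have hf := hall f (by simp)
    have hg := hall g (by simp)
    rcases ha with rfl | rfl <;> rcases hb with rfl | rfl <;>
      rcases hc with rfl | rfl <;> rcases hd with rfl | rfl <;>
      rcases he with rfl | rfl <;> rcases hf with rfl | rfl <;>
      rcases hg with rfl | rfl <;> decide
  · have hb : ¬ ((decide (l.length = 7) && l.all (fun c => PySem.Chars.isIn [c] ['R','N'])) = true) := by
      simp only [Bool.and_eq_true, decide_eq_true_eq, List.all_eq_true]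
      intro ⟨h1, h2⟩
      refine hv ⟨h1, fun c hc => ?_⟩
      have h := h2 c hc
      rw [PySem.Chars.isIn_iff_infix] at h
      have hm : c ∈ ['R', 'N'] := by
        obtain ⟨u, v, huv⟩ := h
        have : c ∈ u ++ [c] ++ v := by simp
        rw [huv] at this; exact this
      simpa using hm
    rw [if_neg hb]
    apply pv_scan_none
    intro e he hmem
    obtain ⟨h7, hRN⟩ := pv_table_valid e he _ hmem
    have hl : (String.ofList l).toList = l := by simp
    rw [hl] at h7 hRN
    refine hv ⟨h7, fun c hc => ?_⟩
    have := List.all_eq_true.mp hRN c hc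
    simpa using this

-- ===== VERDICT (by name: the statement is the Claim_ definition above) =====
theorem patron_inicial_12_spec : Claim_equal_patron_inicial_12 := by
  intro toks _
  unfold Spec_patron_inicial_12 patron_inicial_12 patron_inicial_12_alt
  by_cases hlen : (toks.length : Int) < 7
  · rw [if_pos hlen, if_pos hlen]
  · rw [if_neg hlen, if_neg hlen]
    have hRNl : ("RN" : String).toList = ['R', 'N'] := by decide
    have hkey := pv_key (PySem.Str.join "" (PySem.List.slice toks (some (-7)) none)).toList
    rw [String.ofList_toList] at hkey
    rw [hkey]
    simp [PySem.Str.len_eq, PySem.Str.count_eq, hRNl]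
    norm_cast
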